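-- pv_equiv track=rewrite | github.com/chroakPRO/fun-walk | poi_routing_engine.py | _validate_route_edge_usage
-- ===== SOURCE A (Python) =====
-- from typing import Dict, List, Tuple, Optional
--
-- def _validate_route_edge_usage(route: List[int], max_edge_usage: int = 2) -> bool:
--     """Check if route respects maximum edge usage constraint"""
--     edge_usage = {}
--
--     for i in range(len(route) - 1):
--         u, v = route[i], route[i + 1]
--         # Create canonical edge representation (smaller node first)
--         edge = (min(u, v), max(u, v))
--         edge_usage[edge] = edge_usage.get(edge, 0) + 1
--
--         if edge_usage[edge] > max_edge_usage:
--             return False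
--
--     return True
-- ===== SOURCE B (Python) =====
-- def _validate_route_edge_usage(route, max_edge_usage=2):
--     """Sort-and-scan: canonicalise every consecutive edge, sort the edge list
--     so equal edges become adjacent, collect the lengths of the runs of equal
--     neighbours, and check every run length against the limit (no dict)."""
--     edges = sorted((min(u, v), max(u, v)) for u, v in zip(route, route[1:]))
--     runs = []
--     prev = None
--     for e in edges:
--         if runs and e == prev:
--             runs[-1] += 1
--         else:
--             runs.append(1)
--         prev = e
--     return all(r <= max_edge_usage for r in runs)
-- ===== Notes on version B (the rewrite author's own statement) =====
-- stated objective: alternative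
-- what changed: A counts canonical edges in a dict interleaved with an early-exit bound check; B uses no dict at all: it sorts the canonical edge list so equal edges become adjacent, run-length-encodes the sorted list, and checks the run lengths in a separate aggregate pass.
import Mathlib
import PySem

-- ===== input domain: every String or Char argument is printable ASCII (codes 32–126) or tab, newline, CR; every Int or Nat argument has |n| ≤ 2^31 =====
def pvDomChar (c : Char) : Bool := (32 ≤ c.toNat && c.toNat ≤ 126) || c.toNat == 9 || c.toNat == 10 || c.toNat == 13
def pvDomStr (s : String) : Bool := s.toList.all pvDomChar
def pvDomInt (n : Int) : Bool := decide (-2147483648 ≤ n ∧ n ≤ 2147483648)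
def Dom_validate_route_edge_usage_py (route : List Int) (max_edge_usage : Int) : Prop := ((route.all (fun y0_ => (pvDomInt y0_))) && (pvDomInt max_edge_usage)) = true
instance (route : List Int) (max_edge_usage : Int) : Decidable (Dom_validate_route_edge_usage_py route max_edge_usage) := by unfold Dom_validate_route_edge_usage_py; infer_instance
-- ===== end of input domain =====

-- B replaces A's interleaved dict-count-with-early-exit by a dict-free sort-and-scan:
-- sort the canonical edge list, run-length-encode it, and check the run lengths in a
-- separate aggregate pass (objective: alternative).


-- ===== PORT A =====
-- A's loop visits the consecutive pairs (route[i], route[i+1]) in order, carrying the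
-- edge_usage dict and returning False as soon as a count exceeds max_edge_usage;
-- this is the obvious structural recursion over the same pairs with the same state.
def pvALoop (max_edge_usage : Int) :
    List Int → PySem.Dict (Int × Int) Int → Bool
  | u :: v :: rest, edge_usage =>
      let edge : Int × Int := (min u v, max u v)
      let edge_usage' := edge_usage.insert edge (edge_usage.getD edge 0 + 1)
      if edge_usage'.getD edge 0 > max_edge_usage then false
      else pvALoop max_edge_usage (v :: rest) edge_usage'
  | _, _ => true

def validate_route_edge_usage_py (route : List Int) (max_edge_usage : Int) : Bool :=
  pvALoop max_edge_usage route PySem.Dict.empty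

-- ===== PORT B =====
-- runs[-1] += 1  (the run list is non-empty whenever Python reaches this line)
def pvBump (l : List Int) : List Int := l.dropLast ++ [l.getLastD 0 + 1]

-- one iteration of B's scan over the sorted edges: state = (runs, prev)
def pvRunStep (st : List Int × Option (Int × Int)) (e : Int × Int) :
    List Int × Option (Int × Int) :=
  if st.1 ≠ [] ∧ st.2 = some e then (pvBump st.1, some e)
  else (st.1 ++ [1], some e)

def validate_route_edge_usage_py_alt (route : List Int) (max_edge_usage : Int) : Bool :=
  let edges := PySem.List.sorted2
    ((route.zip (route.drop 1)).map (fun p => (min p.1 p.2, max p.1 p.2)))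
    Prod.fst Prod.snd
  let st := edges.foldl pvRunStep ([], none)
  st.1.all (fun r => decide (r ≤ max_edge_usage))

-- ===== PRECONDITION & SPEC =====
def Spec_validate_route_edge_usage_py (route : List Int) (max_edge_usage : Int) (out : Bool) : Prop := out = validate_route_edge_usage_py_alt route max_edge_usage
instance (route : List Int) (max_edge_usage : Int) (out : Bool) : Decidable (Spec_validate_route_edge_usage_py route max_edge_usage out) := by unfold Spec_validate_route_edge_usage_py; infer_instance

-- ===== CLAIM (what is proved, stated in full; the proofs are below) =====
def Claim_equal_validate_route_edge_usage_py : Prop := ∀ (route : List Int) (max_edge_usage : Int), Dom_validate_route_edge_usage_py route max_edge_usage → Spec_validate_route_edge_usage_py route max_edge_usage (validate_route_edge_usage_py route max_edge_usage)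

-- ===== LEMMAS AND PROOFS =====

-- the canonical edge list of a route (B's unsorted `edges`, and the edges A visits)
def pvEdges (route : List Int) : List (Int × Int) :=
  (route.zip (route.drop 1)).map (fun p => (min p.1 p.2, max p.1 p.2))

theorem pvEdges_cons (u v : Int) (rest : List Int) :
    pvEdges (u :: v :: rest) = (min u v, max u v) :: pvEdges (v :: rest) := by
  simp [pvEdges]

-- characterisation of A's interleaved loop: from a state whose recorded counts all
-- respect the bound, it returns true iff every final total respects the bound
theorem pvALoop_char (m : Int) (route : List Int)
    (d : PySem.Dict (Int × Int) Int)
    (hv : ∀ w ∈ d.values, w ≤ m) :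
    pvALoop m route d = true ↔
      ∀ e ∈ pvEdges route, d.getD e 0 + ((pvEdges route).count e : Int) ≤ m := by
  induction route generalizing d with
  | nil => simp [pvALoop, pvEdges]
  | cons u rest ih =>
    cases rest with
    | nil => simp [pvALoop, pvEdges]
    | cons v rest' =>
      rw [pvEdges_cons]
      set e0 : Int × Int := (min u v, max u v) with he0
      set c := d.getD e0 0 with hc
      by_cases hgt : c + 1 > m
      · -- A exits false; the total for e0 already exceeds m
        have hA : pvALoop m (u :: v :: rest') d = false := by
          simp [pvALoop, ← he0, PySem.Dict.getD_insert_self, ← hc, hgt]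
        rw [hA]
        constructor
        · intro h; cases h
        · intro h
          have h0 := h e0 (List.mem_cons_self)
          have hcnt : 1 ≤ (((e0 :: pvEdges (v :: rest')).count e0 : Nat) : Int) := by
            have : 1 ≤ (e0 :: pvEdges (v :: rest')).count e0 := by simp
            exact_mod_cast this
          omega
      · -- A records the edge and continues with the updated dict
        have hA : pvALoop m (u :: v :: rest') d
            = pvALoop m (v :: rest') (d.insert e0 (c + 1)) := by
          simp [pvALoop, ← he0, PySem.Dict.getD_insert_self, ← hc, hgt]
        rw [hA]
        have hv' : ∀ w ∈ (d.insert e0 (c + 1)).values, w ≤ m := by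
          intro w hw
          rcases PySem.Dict.mem_values_insert _ _ _ _ hw with h | h
          · omega
          · exact hv w h
        rw [ih (d.insert e0 (c + 1)) hv']
        constructor
        · intro h e he
          rcases List.mem_cons.mp he with rfl | he'
          · by_cases hin : e0 ∈ pvEdges (v :: rest')
            · have := h e0 hin
              rw [PySem.Dict.getD_insert_self] at this
              have hcnt : (e0 :: pvEdges (v :: rest')).count e0
                  = (pvEdges (v :: rest')).count e0 + 1 := by
                simp
              rw [hcnt]; push_cast; omega
            · have hcnt : (e0 :: pvEdges (v :: rest')).count e0 = 1 := by
                simp [List.count_eq_zero_of_not_mem hin]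
              rw [hcnt]; push_cast; omega
          · have := h e he'
            rw [PySem.Dict.getD_insert] at this
            by_cases heq : e = e0
            · rw [heq] at this ⊢
              have hcnt : (e0 :: pvEdges (v :: rest')).count e0
                  = (pvEdges (v :: rest')).count e0 + 1 := by
                simp
              rw [hcnt]
              simp only [← hc] at this ⊢
              push_cast at this ⊢; omega
            · simp only [if_neg heq] at this
              have hcnt : (e0 :: pvEdges (v :: rest')).count e
                  = (pvEdges (v :: rest')).count e := by
                simp [Ne.symm heq]
              rw [hcnt]; omega
        · intro h e he
          have hmem : e ∈ e0 :: pvEdges (v :: rest') := List.mem_cons_of_mem _ he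
          have := h e hmem
          rw [PySem.Dict.getD_insert]
          by_cases heq : e = e0
          · rw [heq] at this ⊢
            have hcnt : (e0 :: pvEdges (v :: rest')).count e0
                = (pvEdges (v :: rest')).count e0 + 1 := by
              simp
            rw [hcnt] at this
            simp only [← hc] at this ⊢
            push_cast at this ⊢; omega
          · have hcnt : (e0 :: pvEdges (v :: rest')).count e
                = (pvEdges (v :: rest')).count e := by
              simp [Ne.symm heq]
            rw [hcnt] at this
            simp only [if_neg heq]; omega

-- B-side: the tuple-key sort is the identity-key sort under the lexicographic order
theorem pvInsertBy_congr {α : Type} (f g : α → α → Bool) (h : ∀ a b, f a b = g a b)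
    (x : α) (ys : List α) : PySem.List.insertBy f x ys = PySem.List.insertBy g x ys := by
  induction ys with
  | nil => simp [PySem.List.insertBy]
  | cons y ys ih => simp [PySem.List.insertBy, h x y, ih]

theorem pvFoldl_insertBy_congr {α : Type} (f g : α → α → Bool) (h : ∀ a b, f a b = g a b)
    (xs : List α) : ∀ acc : List α,
    xs.foldl (fun acc x => PySem.List.insertBy f x acc) acc
      = xs.foldl (fun acc x => PySem.List.insertBy g x acc) acc := by
  intro acc
  induction xs generalizing acc with
  | nil => rfl
  | cons x xs ih =>
    rw [List.foldl_cons, List.foldl_cons, pvInsertBy_congr f g h, ih]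

theorem pvSorted2_eq (xs : List (Int × Int)) :
    PySem.List.sorted2 xs Prod.fst Prod.snd false
      = PySem.List.sorted xs (fun e => toLex e) false := by
  refine pvFoldl_insertBy_congr _ _ (fun a b => ?_) xs []
  by_cases h1 : a.1 < b.1
  · simp [h1, Prod.Lex.toLex_lt_toLex]
  · by_cases h2 : b.1 < a.1
    · have : ¬ (toLex a < toLex b) := by
        intro hlt
        rcases Prod.Lex.toLex_lt_toLex.mp hlt with h | ⟨h, h'⟩ <;> omega
      simp [h1, h2, this]
    · have he : a.1 = b.1 := le_antisymm (not_lt.mp h2) (not_lt.mp h1)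
      simp [Prod.Lex.toLex_lt_toLex, he]

-- run lengths of maximal blocks of equal adjacent elements
def runLengths : List (Int × Int) → List Int
  | [] => []
  | x :: xs =>
      (1 + ((xs.takeWhile (· = x)).length : Int)) :: runLengths (xs.dropWhile (· = x))
termination_by l => l.length
decreasing_by
  simpa using Nat.lt_succ_of_le (List.length_dropWhile_le _ xs)

-- B's scan computes exactly the run lengths
theorem pvFoldRun (l : List (Int × Int)) : ∀ (rs : List Int) (r : Int) (p : Int × Int),
    (l.foldl pvRunStep (rs ++ [r], some p)).1
      = rs ++ (r + ((l.takeWhile (· = p)).length : Int))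
          :: runLengths (l.dropWhile (· = p)) := by
  induction l with
  | nil => intro rs r p; simp [runLengths]
  | cons e rest ih =>
    intro rs r p
    by_cases he : e = p
    · subst he
      have hstep : pvRunStep (rs ++ [r], some e) e = (rs ++ [r + 1], some e) := by
        simp [pvRunStep, pvBump]
      have htw : (e :: rest).takeWhile (· = e) = e :: rest.takeWhile (· = e) := by simp
      have hdw : (e :: rest).dropWhile (· = e) = rest.dropWhile (· = e) := by simp
      rw [List.foldl_cons, hstep, ih, htw, hdw]
      simp only [List.length_cons]
      congr 2
      push_cast; ring
    · have hstep : pvRunStep (rs ++ [r], some p) e = ((rs ++ [r]) ++ [1], some e) := by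
        simp [pvRunStep]
        intro h; exact absurd h.symm he
      have htw : (e :: rest).takeWhile (· = p) = [] := by
        simp [he]
      have hdw : (e :: rest).dropWhile (· = p) = e :: rest := by
        simp [he]
      rw [List.foldl_cons, hstep, ih]
      rw [htw, hdw]
      show (rs ++ [r]) ++ _ = rs ++ (r + (0 : Int)) :: runLengths (e :: rest)
      rw [runLengths]
      simp

theorem pvRuns_eq (l : List (Int × Int)) :
    (l.foldl pvRunStep ([], none)).1 = runLengths l := by
  cases l with
  | nil => simp [runLengths]
  | cons e rest =>
    have hstep : pvRunStep ([], none) e = ([] ++ [1], some e) := by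
      simp [pvRunStep]
    rw [List.foldl_cons, hstep, pvFoldRun]
    rw [runLengths]
    simp

-- over a list sorted by toLex, the run lengths are exactly the element counts
theorem pvRuns_le_iff (m : Int) (l : List (Int × Int))
    (hp : l.Pairwise (fun a b => toLex a ≤ toLex b)) :
    (∀ r ∈ runLengths l, r ≤ m) ↔ (∀ e ∈ l, ((l.count e : Nat) : Int) ≤ m) := by
  match l with
  | [] => simp [runLengths]
  | x :: xs =>
    have hxs : xs.takeWhile (· = x) ++ xs.dropWhile (· = x) = xs :=
      List.takeWhile_append_dropWhile
    set t := xs.takeWhile (· = x) with ht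
    set d := xs.dropWhile (· = x) with hd
    have ht_all : ∀ y ∈ t, y = x := by
      intro y hy
      have := List.mem_takeWhile_imp hy
      simpa using this
    have hpx : ∀ y ∈ xs, toLex x ≤ toLex y := by
      intro y hy
      exact (List.pairwise_cons.mp hp).1 y hy
    have hpxs : xs.Pairwise (fun a b => toLex a ≤ toLex b) :=
      (List.pairwise_cons.mp hp).2
    have hpd : d.Pairwise (fun a b => toLex a ≤ toLex b) :=
      List.Pairwise.sublist (List.dropWhile_sublist _) hpxs
    have hdx : x ∉ d := by
      intro hx
      cases hdc : d with
      | nil => rw [hdc] at hx; cases hx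
      | cons h d' =>
        have hhx : h ≠ x := by
          have := List.head?_dropWhile_not (fun y => decide (y = x)) xs
          rw [← hd, hdc] at this
          simpa using this
        rw [hdc] at hx
        rcases List.mem_cons.mp hx with rfl | hx'
        · exact hhx rfl
        · have h1 : toLex h ≤ toLex x := by
            rw [hdc] at hpd
            exact (List.pairwise_cons.mp hpd).1 x hx'
          have h2 : toLex x ≤ toLex h := by
            apply hpx
            rw [← hxs, hdc]
            exact List.mem_append_right _ List.mem_cons_self
          exact hhx (toLex.injective (le_antisymm h1 h2))
    have hcx : (x :: xs).count x = 1 + t.length := by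
      rw [← hxs, List.count_cons_self, List.count_append]
      have h1 : t.count x = t.length := List.count_eq_length.mpr
        (fun y hy => ((ht_all y hy).symm : x = y))
      have h2 : d.count x = 0 := List.count_eq_zero_of_not_mem hdx
      omega
    have hce : ∀ e ∈ d, (x :: xs).count e = d.count e := by
      intro e he
      have hex : e ≠ x := fun h => hdx (h ▸ he)
      rw [← hxs, List.count_cons_of_ne (Ne.symm hex), List.count_append]
      have : t.count e = 0 := List.count_eq_zero_of_not_mem
        (fun hmem => hex (ht_all e hmem))
      omega
    have hrl : runLengths (x :: xs) = (1 + (t.length : Int)) :: runLengths d := by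
      rw [runLengths]
    have ih := pvRuns_le_iff m d hpd
    rw [hrl]
    constructor
    · intro h e he
      rcases List.mem_cons.mp he with rfl | he'
      · rw [hcx]
        have := h _ List.mem_cons_self
        push_cast
        omega
      · rw [← hxs] at he'
        rcases List.mem_append.mp he' with hmem | hmem
        · have : e = x := ht_all e hmem
          subst this
          rw [hcx]
          have := h _ List.mem_cons_self
          push_cast
          omega
        · rw [hce e hmem]
          exact ih.mp (fun r hr => h r (List.mem_cons_of_mem _ hr)) e hmem
    · intro h r hr
      rcases List.mem_cons.mp hr with rfl | hr'
      · have := h x List.mem_cons_self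
        rw [hcx] at this
        push_cast at this
        omega
      · refine ih.mpr ?_ r hr'
        intro e he
        have hmem : e ∈ x :: xs := by
          apply List.mem_cons_of_mem
          rw [← hxs]
          exact List.mem_append_right _ he
        have := h e hmem
        rw [hce e he] at this
        exact this
termination_by l.length
decreasing_by
  simpa using Nat.lt_succ_of_le (List.length_dropWhile_le _ xs)

-- characterisation of B: true iff every edge's total count respects the bound
theorem pvB_char (route : List Int) (m : Int) :
    validate_route_edge_usage_py_alt route m = true ↔
      ∀ e ∈ pvEdges route, (((pvEdges route).count e : Nat) : Int) ≤ m := by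
  show ((PySem.List.sorted2 (pvEdges route) Prod.fst Prod.snd false).foldl
      pvRunStep ([], none)).1.all (fun r => decide (r ≤ m)) = true ↔ _
  rw [pvSorted2_eq, pvRuns_eq]
  set S := PySem.List.sorted (pvEdges route) (fun e => toLex e) false with hS
  have hperm : S.Perm (pvEdges route) := PySem.List.sorted_perm _ _ _
  have hpw : S.Pairwise (fun a b => toLex a ≤ toLex b) :=
    PySem.List.sorted_pairwise _ _
  rw [List.all_eq_true]
  constructor
  · intro h e he
    rw [← hperm.count_eq e]
    exact (pvRuns_le_iff m S hpw).mp (fun r hr => by simpa using h r hr) e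
      (hperm.mem_iff.mpr he)
  · intro h r hr
    simp only [decide_eq_true_eq]
    refine (pvRuns_le_iff m S hpw).mpr ?_ r hr
    intro e he
    rw [hperm.count_eq e]
    exact h e (hperm.mem_iff.mp he)

-- ===== VERDICT (by name: the statement is the Claim_ definition above) =====
theorem validate_route_edge_usage_py_spec : Claim_equal_validate_route_edge_usage_py := by
  intro route m _
  unfold Spec_validate_route_edge_usage_py
  have hA := pvALoop_char m route PySem.Dict.empty
    (by simp [PySem.Dict.values, PySem.Dict.empty])
  have hB := pvB_char route m
  have : validate_route_edge_usage_py route m = true ↔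
      validate_route_edge_usage_py_alt route m = true := by
    rw [validate_route_edge_usage_py, hA, hB]
    constructor
    · intro h e he
      have := h e he
      simpa [PySem.Dict.getD_empty] using this
    · intro h e he
      simpa [PySem.Dict.getD_empty] using h e he
  exact Bool.coe_iff_coe.mp this
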